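-- pv_equiv track=rewrite | github.com/Hukyl/minjust_parser | minjust_parser/models/excel_handler.py | get_column_letters
-- ===== SOURCE A (Python) =====
-- import string
-- import itertools
--
-- def get_column_letters(limit):
--     n = 0
--     length = 1
--     while True:
--         for i in itertools.combinations_with_replacement(
--             string.ascii_uppercase, length
--         ):
--             if n == limit:
--                 return
--             yield "".join(i)
--             n += 1
--         length += 1
-- ===== SOURCE B (Python) =====
-- def _strings(length, start):
--     """All non-decreasing uppercase strings of the given length whose first
--     letter index is >= start, in lexicographic order."""
--     if length == 0:
--         return [""]
--     return [chr(65 + i) + rest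
--             for i in range(start, 26)
--             for rest in _strings(length - 1, i)]
--
--
-- def get_column_letters(limit):
--     remaining = limit
--     length = 1
--     while remaining > 0:
--         batch = _strings(length, 0)
--         for s in batch[:remaining]:
--             yield s
--         remaining -= len(batch)
--         length += 1
-- ===== Notes on version B (the rewrite author's own statement) =====
-- stated objective: alternative
-- what changed: B drops itertools.combinations_with_replacement and generates the non-decreasing letter strings directly with a recursive helper indexed by (length, minimum letter index), and consumes whole per-length batches by slicing with a 'remaining' budget instead of A's per-item counter check.
import Mathlib
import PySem

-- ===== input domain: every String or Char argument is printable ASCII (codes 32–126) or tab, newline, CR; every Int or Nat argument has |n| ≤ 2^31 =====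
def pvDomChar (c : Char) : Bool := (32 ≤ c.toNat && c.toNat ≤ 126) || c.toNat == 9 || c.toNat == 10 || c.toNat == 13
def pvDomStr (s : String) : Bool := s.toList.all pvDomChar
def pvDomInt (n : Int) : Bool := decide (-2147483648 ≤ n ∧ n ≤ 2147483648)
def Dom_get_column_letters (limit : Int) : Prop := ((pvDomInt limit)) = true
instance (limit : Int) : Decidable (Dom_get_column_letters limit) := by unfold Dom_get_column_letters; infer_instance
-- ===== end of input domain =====

-- B replaces itertools.combinations_with_replacement with a direct recursive generation of
-- the non-decreasing letter strings and takes whole batches by slicing instead of a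
-- per-item counter check (objective: alternative; return value of listing the generator).

-- ===== PORT A =====

-- string.ascii_uppercase
def pvUppercase : List Char := "ABCDEFGHIJKLMNOPQRSTUVWXYZ".toList

-- itertools.combinations_with_replacement(pool, r), in itertools' lexicographic order
def pvCwr : List Char → Nat → List (List Char)
  | _, 0 => [[]]
  | [], _ + 1 => []
  | (x :: xs), (r + 1) => ((pvCwr (x :: xs) r).map (x :: ·)) ++ pvCwr xs (r + 1)

-- the batch produced by one pass of A's inner for-loop: "".join(i) for each combination
def pvABatch (length : Nat) : List String :=
  (pvCwr pvUppercase length).map (fun l => String.mk l)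

theorem pvCwr_ne_nil (r : Nat) (x : Char) (xs : List Char) : pvCwr (x :: xs) r ≠ [] := by
  induction r with
  | zero => simp [pvCwr]
  | succ r ih => simp [pvCwr]; intro h; exact absurd h ih

theorem pvABatch_ne_nil (length : Nat) : pvABatch length ≠ [] := by
  simp [pvABatch, pvUppercase]
  exact pvCwr_ne_nil length _ _

-- A's inner for-loop: before each yield, check n == limit (here: rem = 0).
-- Result: the yielded strings, and `some rem'` if the batch was exhausted (go to next
-- length) or `none` if the generator returned (limit reached).
def pvEmit : Nat → List String → List String × Option Nat
  | rem, [] => ([], some rem)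
  | rem, s :: rest =>
      if rem = 0 then ([], none)
      else
        let (out, r) := pvEmit (rem - 1) rest
        (s :: out, r)

theorem pvEmit_some_le (items : List String) (rem rem' : Nat) (out : List String)
    (h : pvEmit rem items = (out, some rem')) : rem' ≤ rem := by
  induction items generalizing rem out with
  | nil => simp [pvEmit] at h; omega
  | cons s rest ih =>
    by_cases h0 : rem = 0
    · simp [pvEmit, h0] at h
    · simp only [pvEmit, if_neg h0] at h
      rcases hr : pvEmit (rem - 1) rest with ⟨out', r⟩
      rw [hr] at h
      simp only [Prod.mk.injEq] at h
      rw [h.2] at hr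
      have := ih (rem - 1) out' hr
      omega

-- A's while True loop over length = 1, 2, 3, …
def pvAOuter (rem : Nat) (length : Nat) : List String :=
  match h : pvEmit rem (pvABatch length) with
  | (out, none) => out
  | (out, some rem') => out ++ pvAOuter rem' (length + 1)
termination_by rem
decreasing_by
  have hle := pvEmit_some_le (pvABatch length) rem rem' out h
  rcases hb : pvABatch length with _ | ⟨s, rest⟩
  · exact absurd hb (pvABatch_ne_nil length)
  · rw [hb] at h
    by_cases h0 : rem = 0
    · simp [pvEmit, h0] at h
    · simp only [pvEmit, if_neg h0] at h
      rcases hr : pvEmit (rem - 1) rest with ⟨out', r⟩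
      rw [hr] at h
      simp only [Prod.mk.injEq] at h
      rw [h.2] at hr
      have := pvEmit_some_le rest (rem - 1) rem' out' hr
      omega

-- negative limit never equals the Nat counter n, so the Python generator never terminates;
-- Pre_ excludes it and the port's Int.toNat there is never relied upon
def get_column_letters (limit : Int) : List String :=
  pvAOuter limit.toNat 1

-- ===== PORT B =====

-- _strings(length, start): strings (as char lists; joined to String below) of the given
-- length, letters non-decreasing, first letter index ≥ start, lexicographic
def pvBStrings : Nat → Nat → List (List Char)
  | 0, _ => [[]]
  | (l + 1), start =>
      (List.range' start (26 - start)).flatMap fun i =>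
        (pvBStrings l i).map (fun rest => Char.ofNat (65 + i) :: rest)

theorem pvBStrings_zero_ne_nil (l : Nat) : pvBStrings l 0 ≠ [] := by
  induction l with
  | zero => simp [pvBStrings]
  | succ l ih =>
    show (List.range' 0 26).flatMap _ ≠ []
    have : List.range' 0 26 = 0 :: List.range' 1 25 := by decide
    simp only [this, List.flatMap_cons]
    intro hnil
    rcases List.append_eq_nil_iff.mp hnil with ⟨h1, _⟩
    exact ih (List.map_eq_nil_iff.mp h1)

-- B's while-loop: slice the whole batch by `remaining`, then subtract its length
def pvBOuter (remaining : Int) (length : Nat) : List String :=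
  if h : 0 < remaining then
    let batch := (pvBStrings length 0).map (fun l => String.mk l)
    batch.take remaining.toNat ++ pvBOuter (remaining - batch.length) (length + 1)
  else []
termination_by remaining.toNat
decreasing_by
  have hb : pvBStrings length 0 ≠ [] := pvBStrings_zero_ne_nil length
  have : 0 < (pvBStrings length 0).length := List.length_pos_iff.mpr hb
  simp only [List.length_map]
  omega

def get_column_letters_alt (limit : Int) : List String :=
  pvBOuter limit 1

-- ===== PRECONDITION & SPEC =====
-- Pre_ excludes negative limits: there the Python A is a generator that never terminates
-- (the n == limit check can never fire), so A has no return value to match.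
def Pre_get_column_letters (limit : Int) : Prop := 0 ≤ limit
instance (limit : Int) : Decidable (Pre_get_column_letters limit) := by unfold Pre_get_column_letters; infer_instance

def pvWitness_get_column_letters : Int := (29)

def Spec_get_column_letters (limit : Int) (out : List String) : Prop := out = get_column_letters_alt limit
instance (limit : Int) (out : List String) : Decidable (Spec_get_column_letters limit out) := by unfold Spec_get_column_letters; infer_instance

-- ===== CLAIM (what is proved, stated in full; the proofs are below) =====
def Claim_equal_get_column_letters : Prop := ∀ (limit : Int), Dom_get_column_letters limit → Pre_get_column_letters limit → Spec_get_column_letters limit (get_column_letters limit)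

-- ===== LEMMAS AND PROOFS =====

theorem pvU_get (s : Nat) (hs : s < 26) :
    pvUppercase.drop s = Char.ofNat (65 + s) :: pvUppercase.drop (s + 1) := by
  interval_cases s <;> decide

theorem pv_cwr_eq_bStrings : ∀ (l k s : Nat), s + k = 26 →
    pvCwr (pvUppercase.drop s) l = pvBStrings l s := by
  intro l
  induction l with
  | zero =>
    intro k s hk
    cases h : pvUppercase.drop s <;> simp [pvCwr, pvBStrings]
  | succ l ihl =>
    intro k
    induction k with
    | zero =>
      intro s hk
      have hs : s = 26 := by omega
      subst hs
      have h26 : pvUppercase.drop 26 = [] := by decide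
      rw [h26]
      show pvCwr [] (l + 1) = pvBStrings (l + 1) 26
      simp [pvCwr, pvBStrings]
    | succ k ihk =>
      intro s hk
      have hs : s < 26 := by omega
      rw [pvU_get s hs]
      rw [show pvCwr (Char.ofNat (65 + s) :: pvUppercase.drop (s + 1)) (l + 1) =
            (pvCwr (Char.ofNat (65 + s) :: pvUppercase.drop (s + 1)) l).map (Char.ofNat (65 + s) :: ·) ++
            pvCwr (pvUppercase.drop (s + 1)) (l + 1) from by simp [pvCwr]]
      rw [← pvU_get s hs]
      rw [ihl (k + 1) s hk, ihk (s + 1) (by omega)]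
      have h1 : 26 - s = k + 1 := by omega
      have h2 : 26 - (s + 1) = k := by omega
      show (pvBStrings l s).map (Char.ofNat (65 + s) :: ·) ++ pvBStrings (l + 1) (s + 1) =
        (List.range' s (26 - s)).flatMap fun i =>
          (pvBStrings l i).map (fun rest => Char.ofNat (65 + i) :: rest)
      rw [h1, List.range'_succ, List.flatMap_cons]
      show _ = _ ++ (List.range' (s + 1) k).flatMap _
      rw [← h2]
      rfl

theorem pv_batch_eq (length : Nat) :
    pvABatch length = (pvBStrings length 0).map (fun l => String.mk l) := by
  have h := pv_cwr_eq_bStrings length 26 0 (by omega)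
  rw [List.drop_zero] at h
  rw [pvABatch, h]

theorem pvEmit_eq (items : List String) (rem : Nat) :
    pvEmit rem items =
      if items.length ≤ rem then (items, some (rem - items.length))
      else (items.take rem, none) := by
  induction items generalizing rem with
  | nil => simp [pvEmit]
  | cons s rest ih =>
    by_cases h0 : rem = 0
    · simp [pvEmit, h0]
    · simp only [pvEmit, if_neg h0, ih (rem - 1)]
      by_cases hl : rest.length ≤ rem - 1
      · rw [if_pos hl, if_pos (by simp; omega)]
        simp; omega
      · rw [if_neg hl, if_neg (by simp; omega)]
        have hr : rem = (rem - 1) + 1 := by omega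
        rw [hr, List.take_succ_cons]
        simp

theorem pvBOuter_neg (r : Int) (length : Nat) (h : ¬ 0 < r) : pvBOuter r length = [] := by
  rw [pvBOuter, dif_neg h]

theorem pv_outer_eq : ∀ (rem length : Nat), pvAOuter rem length = pvBOuter (rem : Int) length := by
  intro rem
  induction rem using Nat.strong_induction_on with
  | _ rem ih =>
    intro length
    have hlen : 0 < (pvABatch length).length := List.length_pos_iff.mpr (pvABatch_ne_nil length)
    rw [pvAOuter]
    split
    · rename_i out h
      rw [pvEmit_eq] at h
      split_ifs at h with hle
      · simp at h
      · simp only [Prod.mk.injEq] at h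
        rw [← h.1]
        by_cases h0 : 0 < rem
        · rw [pvBOuter, dif_pos (by exact_mod_cast h0)]
          simp only [← pv_batch_eq length]
          rw [pvBOuter_neg _ _ (by omega)]
          rw [List.append_nil, Int.toNat_natCast]
        · have h0' : rem = 0 := by omega
          subst h0'
          rw [pvBOuter_neg _ _ (by norm_num), List.take_zero]
    · rename_i out rem' h
      rw [pvEmit_eq] at h
      split_ifs at h with hle
      · simp only [Prod.mk.injEq, Option.some.injEq] at h
        rw [← h.1, ← h.2]
        have h0 : 0 < rem := by omega
        rw [pvBOuter, dif_pos (by exact_mod_cast h0)]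
        simp only [← pv_batch_eq length]
        rw [Int.toNat_natCast, List.take_of_length_le hle]
        have hc : (rem : Int) - (pvABatch length).length = ((rem - (pvABatch length).length : Nat) : Int) := by
          omega
        rw [hc, ← ih (rem - (pvABatch length).length) (by omega) (length + 1)]
      · simp at h

-- ===== VERDICT (by name: the statement is the Claim_ definition above) =====
theorem get_column_letters_spec : Claim_equal_get_column_letters := by
  intro limit _ hpre
  show get_column_letters limit = get_column_letters_alt limit
  unfold get_column_letters get_column_letters_alt
  rw [pv_outer_eq limit.toNat 1, Int.toNat_of_nonneg hpre]
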